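-- pv_equiv track=rewrite | github.com/JackNoArms/DevSeek | core/command_parser.py | _common_indent
-- ===== SOURCE A (Python) =====
-- def _common_indent(lines: list) -> str:
--     """Longest common leading whitespace among non-empty lines."""
--     non_empty = [l for l in lines if l.strip()]
--     if not non_empty:
--         return ""
--     prefix = non_empty[0][: len(non_empty[0]) - len(non_empty[0].lstrip())]
--     for line in non_empty[1:]:
--         ind = line[: len(line) - len(line.lstrip())]
--         common = []
--         for a, b in zip(prefix, ind):
--             if a == b:
--                 common.append(a)
--             else:
--                 break
--         prefix = "".join(common)
--         if not prefix:
--             break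
--     return prefix
-- ===== SOURCE B (Python) =====
-- def _common_indent(lines: list) -> str:
--     """Longest common leading whitespace among non-empty lines."""
--     indents = [line[:len(line) - len(line.lstrip())] for line in lines if line.strip()]
--     if not indents:
--         return ""
--     first = indents[0]
--     n = min(len(ind) for ind in indents)
--     out = []
--     for i in range(n):
--         c = first[i]
--         if all(ind[i] == c for ind in indents):
--             out.append(c)
--         else:
--             break
--     return "".join(out)
-- ===== Notes on version B (the rewrite author's own statement) =====
-- stated objective: alternative
-- what changed: Replaces A's row-wise fold that repeatedly shrinks a prefix via pairwise zip-compare with a column-major scan: collect all indents once, then walk columns 0..min-length and keep a column's character only while every indent agrees.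
import Mathlib
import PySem

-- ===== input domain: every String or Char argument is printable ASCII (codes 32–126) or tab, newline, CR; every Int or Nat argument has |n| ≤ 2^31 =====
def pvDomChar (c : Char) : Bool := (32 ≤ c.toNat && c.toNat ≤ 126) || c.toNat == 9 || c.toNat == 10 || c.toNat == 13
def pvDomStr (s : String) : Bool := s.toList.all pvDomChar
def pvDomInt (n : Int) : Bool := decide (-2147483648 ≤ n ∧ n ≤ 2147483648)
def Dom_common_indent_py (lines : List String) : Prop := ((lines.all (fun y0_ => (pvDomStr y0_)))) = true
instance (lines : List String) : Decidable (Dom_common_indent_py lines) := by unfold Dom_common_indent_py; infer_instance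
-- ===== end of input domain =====

-- B re-implements A's row-wise shrinking-prefix fold as a column-major scan over all indents; return value equivalence, no side effects involved.

-- ===== PORT A =====
-- indent extraction: line[: len(line) - len(line.lstrip())]
def indentA (l : String) : List Char :=
  PySem.List.slice l.toList none (some ((l.toList.length : Int) - ((PySem.Chars.lstrip l.toList).length : Int)))

-- inner loop: common = []; for a, b in zip(prefix, ind): if a == b: common.append(a) else: break
def lcpA : List Char → List Char → List Char
  | a :: as_, b :: bs => if a == b then a :: lcpA as_ bs else []
  | _, _ => []

-- outer loop over non_empty[1:] with the 'if not prefix: break'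
def loopA : List Char → List String → List Char
  | pre, [] => pre
  | pre, line :: rest =>
    let ind := indentA line
    let common := lcpA pre ind
    if common.isEmpty then common else loopA common rest

def common_indent_py (lines : List String) : String :=
  match lines.filter (fun l => !(PySem.Chars.strip l.toList).isEmpty) with
  | [] => ""
  | first :: rest => String.ofList (loopA (indentA first) rest)

-- ===== PORT B =====
def indentB (l : String) : List Char :=
  PySem.List.slice l.toList none (some ((l.toList.length : Int) - ((PySem.Chars.lstrip l.toList).length : Int)))

-- for i in range(n): c = first[i]; if all(ind[i] == c for ind in indents): out.append(c) else: break
def colGo (first : List Char) (indents : List (List Char)) : Nat → Nat → List Char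
  | _, 0 => []
  | i, Nat.succ k =>
    match first[i]? with
    | none => []
    | some c =>
      if indents.all (fun ind => ind[i]? == some c) then c :: colGo first indents (i + 1) k
      else []

def common_indent_py_alt (lines : List String) : String :=
  match (lines.filter (fun l => !(PySem.Chars.strip l.toList).isEmpty)).map indentB with
  | [] => ""
  | first :: rest =>
    let n := (rest.map List.length).foldl Nat.min first.length
    String.ofList (colGo first (first :: rest) 0 n)

-- ===== PRECONDITION & SPEC =====
def Spec_common_indent_py (lines : List String) (out : String) : Prop := out = common_indent_py_alt lines
instance (lines : List String) (out : String) : Decidable (Spec_common_indent_py lines out) := by unfold Spec_common_indent_py; infer_instance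

-- ===== CLAIM (what is proved, stated in full; the proofs are below) =====
def Claim_equal_common_indent_py : Prop := ∀ (lines : List String), Dom_common_indent_py lines → Spec_common_indent_py lines (common_indent_py lines)

-- ===== LEMMAS AND PROOFS =====

theorem lcpA_nil_left (y : List Char) : lcpA [] y = [] := by cases y <;> rfl

theorem foldl_lcpA_nil (L : List (List Char)) : L.foldl lcpA [] = [] := by
  induction L with
  | nil => rfl
  | cons q L ih => simpa [lcpA_nil_left] using ih

theorem lcpA_prefix_left (x y : List Char) : lcpA x y <+: x := by
  induction x generalizing y with
  | nil => simp [lcpA_nil_left]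
  | cons a as ih =>
    cases y with
    | nil => simp [lcpA]
    | cons b bs =>
      by_cases h : a = b
      · simpa [lcpA, h] using ih bs
      · simp [lcpA, h]

theorem lcpA_prefix_right (x y : List Char) : lcpA x y <+: y := by
  induction x generalizing y with
  | nil => simp [lcpA_nil_left]
  | cons a as ih =>
    cases y with
    | nil => simp [lcpA]
    | cons b bs =>
      by_cases h : a = b
      · subst h; simpa [lcpA] using ih bs
      · simp [lcpA, h]

theorem foldl_lcpA_prefix_acc (L : List (List Char)) (p : List Char) :
    L.foldl lcpA p <+: p := by
  induction L generalizing p with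
  | nil => simp
  | cons q L ih =>
    exact (ih (lcpA p q)).trans (lcpA_prefix_left p q)

theorem foldl_lcpA_prefix_mem (L : List (List Char)) (p x : List Char) (hx : x ∈ L) :
    L.foldl lcpA p <+: x := by
  induction L generalizing p with
  | nil => simp at hx
  | cons q L ih =>
    rcases List.mem_cons.mp hx with h | h
    · subst h
      exact (foldl_lcpA_prefix_acc L (lcpA p x)).trans (lcpA_prefix_right p x)
    · exact ih (lcpA p q) h

theorem lcpA_take (n : Nat) (x y : List Char) :
    lcpA (x.take n) y = (lcpA x y).take n := by
  induction x generalizing n y with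
  | nil => simp [lcpA_nil_left]
  | cons a as ih =>
    cases n with
    | zero => simp [lcpA_nil_left]
    | succ m =>
      cases y with
      | nil => simp [lcpA]
      | cons b bs =>
        by_cases h : a = b
        · simp [lcpA, h, ih]
        · simp [lcpA, h]

theorem foldl_lcpA_take (L : List (List Char)) (p : List Char) (n : Nat) :
    L.foldl lcpA (p.take n) = (L.foldl lcpA p).take n := by
  induction L generalizing p with
  | nil => simp
  | cons q L ih => simp [List.foldl_cons, lcpA_take, ih]

theorem foldl_lcpA_cons (c : Char) (p : List Char) (L : List (List Char))
    (h : ∀ q ∈ L, ∃ q', q = c :: q') :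
    L.foldl lcpA (c :: p) = c :: (L.map List.tail).foldl lcpA p := by
  induction L generalizing p with
  | nil => simp
  | cons q L ih =>
    obtain ⟨q', rfl⟩ := h q (List.mem_cons_self ..)
    have : lcpA (c :: p) (c :: q') = c :: lcpA p q' := by simp [lcpA]
    simp only [List.foldl_cons, this, List.map_cons, List.tail_cons]
    exact ih (lcpA p q') (fun r hr => h r (List.mem_cons_of_mem _ hr))

theorem le_foldl_min (L : List Nat) (a m : Nat) (ha : m ≤ a) (hL : ∀ x ∈ L, m ≤ x) :
    m ≤ L.foldl Nat.min a := by
  induction L generalizing a with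
  | nil => simpa using ha
  | cons b L ih =>
    exact ih (Nat.min a b) (le_min ha (hL b (List.mem_cons_self ..)))
      (fun x hx => hL x (List.mem_cons_of_mem _ hx))

theorem foldl_min_le_head (L : List Nat) (a : Nat) : L.foldl Nat.min a ≤ a := by
  induction L generalizing a with
  | nil => simp
  | cons b L ih => exact (ih (Nat.min a b)).trans (Nat.min_le_left a b)

theorem foldl_min_le_mem (L : List Nat) (a x : Nat) (hx : x ∈ L) : L.foldl Nat.min a ≤ x := by
  induction L generalizing a with
  | nil => simp at hx
  | cons b L ih =>
    rcases List.mem_cons.mp hx with h | h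
    · subst h; exact (foldl_min_le_head L (Nat.min a x)).trans (Nat.min_le_right a x)
    · exact ih (Nat.min a b) h

-- A's outer loop with early break is the plain fold of lcpA over the indents.
theorem loopA_eq (rest : List String) (pre : List Char) :
    loopA pre rest = (rest.map indentA).foldl lcpA pre := by
  induction rest generalizing pre with
  | nil => rfl
  | cons line rest ih =>
    simp only [loopA, List.map_cons, List.foldl_cons]
    by_cases h : (lcpA pre (indentA line)).isEmpty
    · rw [if_pos h]
      rw [List.isEmpty_iff.mp h, foldl_lcpA_nil]
    · rw [if_neg h]; exact ih _

-- B's column scan equals the fold of lcpA, column window [i, i+k) with i + k = n.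
theorem colGo_eq (F : List Char) (R : List (List Char)) (n : Nat)
    (hF : n ≤ F.length) (hR : ∀ x ∈ R, n ≤ x.length) :
    ∀ k i, i + k = n →
      colGo F (F :: R) i k = (R.map (List.drop i)).foldl lcpA ((F.drop i).take k) := by
  intro k
  induction k with
  | zero =>
    intro i _
    simp [colGo, foldl_lcpA_nil]
  | succ k ih =>
    intro i hin
    have hiF : i < F.length := by omega
    have hget : F[i]? = some F[i] := List.getElem?_eq_getElem hiF
    have hdropF : F.drop i = F[i] :: F.drop (i + 1) := List.drop_eq_getElem_cons hiF
    by_cases hall : ∀ x ∈ R, x[i]? = some F[i]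
    · have hcond : (F :: R).all (fun ind => ind[i]? == some F[i]) = true := by
        simp only [List.all_eq_true, beq_iff_eq]
        intro x hx
        rcases List.mem_cons.mp hx with h | h
        · subst h; exact hget
        · exact hall x h
      have hstep : colGo F (F :: R) i (k + 1) = F[i] :: colGo F (F :: R) (i + 1) k := by
        simp [colGo, hget, hcond]
      rw [hstep, ih (i + 1) (by omega)]
      have hacc : (F.drop i).take (k + 1) = F[i] :: (F.drop (i + 1)).take k := by
        rw [hdropF]; rfl
      rw [hacc, foldl_lcpA_cons]
      · have hmm : (R.map (List.drop i)).map List.tail = R.map (List.drop (i + 1)) := by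
          rw [List.map_map]
          exact List.map_congr_left (fun x _ => by simp only [Function.comp_apply, List.tail_drop])
        rw [hmm]
      · intro q hq
        obtain ⟨x, hx, rfl⟩ := List.mem_map.mp hq
        have hix : i < x.length := by have := hR x hx; omega
        refine ⟨x.drop (i + 1), ?_⟩
        rw [List.drop_eq_getElem_cons hix]
        have := hall x hx
        rw [List.getElem?_eq_getElem hix] at this
        simp only [Option.some.injEq] at this
        rw [this]
    · push Not at hall
      obtain ⟨x, hx, hne⟩ := hall
      have hcond : (F :: R).all (fun ind => ind[i]? == some F[i]) = false := by
        simp only [List.all_eq_false]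
        exact ⟨x, List.mem_cons_of_mem _ hx, by simpa using hne⟩
      have hstep : colGo F (F :: R) i (k + 1) = [] := by
        simp [colGo, hget, hcond]
      rw [hstep]
      -- the fold result is a prefix of both the accumulator and x.drop i, which disagree at 0
      set r := (R.map (List.drop i)).foldl lcpA ((F.drop i).take (k + 1)) with hr
      rcases hr' : r with _ | ⟨e, r'⟩
      · rfl
      · exfalso
        have hpa : r <+: (F.drop i).take (k + 1) := foldl_lcpA_prefix_acc _ _
        have hpx : r <+: x.drop i := foldl_lcpA_prefix_mem _ _ _ (List.mem_map_of_mem hx)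
        have hix : i < x.length := by have := hR x hx; omega
        have hdx : x.drop i = x[i] :: x.drop (i + 1) := List.drop_eq_getElem_cons hix
        rw [hr'] at hpa hpx
        have h1 : e = F[i] := by
          rcases hpa with ⟨t, ht⟩
          rw [hdropF, List.take_succ_cons, List.cons_append] at ht
          exact (List.cons_eq_cons.mp ht).1
        have h2 : e = x[i] := by
          rcases hpx with ⟨t, ht⟩
          rw [hdx, List.cons_append] at ht
          exact (List.cons_eq_cons.mp ht).1
        apply hne
        rw [List.getElem?_eq_getElem hix, ← h2, h1]

theorem indentB_eq : indentB = indentA := rfl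

theorem length_foldl_lcpA_le (L : List (List Char)) (p x : List Char) (hx : x ∈ L) :
    (L.foldl lcpA p).length ≤ x.length :=
  (foldl_lcpA_prefix_mem L p x hx).length_le

-- ===== VERDICT (by name: the statement is the Claim_ definition above) =====
theorem common_indent_py_spec : Claim_equal_common_indent_py := by
  intro lines _
  unfold Spec_common_indent_py common_indent_py common_indent_py_alt
  cases hfil : lines.filter (fun l => !(PySem.Chars.strip l.toList).isEmpty) with
  | nil => simp
  | cons first rest =>
    simp only [List.map_cons, indentB_eq]
    set F := indentA first with hF
    set R := rest.map indentA with hRdef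
    set n := (R.map List.length).foldl Nat.min F.length with hn
    have hFn : n ≤ F.length := foldl_min_le_head _ _
    have hRn : ∀ x ∈ R, n ≤ x.length := fun x hx =>
      foldl_min_le_mem _ _ _ (List.mem_map_of_mem hx)
    have hB : colGo F (F :: R) 0 n = (R.map (List.drop 0)).foldl lcpA ((F.drop 0).take n) :=
      colGo_eq F R n hFn hRn n 0 (by omega)
    rw [List.drop_zero] at hB
    have hmap : R.map (List.drop 0) = R :=
      (List.map_congr_left (fun x _ => List.drop_zero)).trans (List.map_id R)
    rw [hmap] at hB
    have htake : R.foldl lcpA (F.take n) = (R.foldl lcpA F).take n := foldl_lcpA_take R F n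
    have hlen : (R.foldl lcpA F).length ≤ n := by
      apply le_foldl_min
      · exact (foldl_lcpA_prefix_acc R F).length_le
      · intro x hx
        obtain ⟨y, hy, rfl⟩ := List.mem_map.mp hx
        exact length_foldl_lcpA_le R F y hy
    rw [loopA_eq, hB, htake, List.take_of_length_le hlen]
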